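-- pv_equiv track=rewrite | github.com/capy69420/dventofcode | day23.py | no_elf_around
-- ===== SOURCE A (Python) =====
-- def no_elf_around(elf, grove):
--     rows, cols = len(grove), len(grove[0])
--     row, col = elf
--     directions = [(-1, 0), (-1, 1), (0, 1), (1, 1), (1, 0), (1, -1), (0, -1), (-1, -1)]
--
--     for direction in directions:
--         row_offset, col_offset = direction
--         if (row + row_offset >= 0 and
--                 row + row_offset < rows and
--                 col + col_offset >= 0 and
--                 col + col_offset < cols and
--                 grove[row + row_offset][col + col_offset] == "#"):
--             return False
--
--     return True
-- ===== SOURCE B (Python) =====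
-- def no_elf_around(elf, grove):
--     rows, cols = len(grove), len(grove[0])
--     row, col = elf
--     cl, cu = max(0, col - 1), min(cols, col + 2)
--     parts = []
--     for r in range(max(0, row - 1), min(rows, row + 2)):
--         line = grove[r]
--         if r == row and 0 <= col < cols:
--             parts.append(line[cl:col] + line[col + 1:cu])
--         elif cl < cu:
--             parts.append(line[cl:cu])
--     return "#" not in "".join(parts)
-- ===== Notes on version B (the rewrite author's own statement) =====
-- stated objective: alternative
-- what changed: Instead of probing the 8 neighbor cells one by one with four bounds guards and an early return, B slices the clamped 3x3 window (minus the center cell) out of the rows, joins the slices into one string, and decides with a single substring test '#' not in window.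
-- outside the precondition, e.g. on no_elf_around((1, 1), ['.', '', '#']): A returns False, B returns False
import Mathlib
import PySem

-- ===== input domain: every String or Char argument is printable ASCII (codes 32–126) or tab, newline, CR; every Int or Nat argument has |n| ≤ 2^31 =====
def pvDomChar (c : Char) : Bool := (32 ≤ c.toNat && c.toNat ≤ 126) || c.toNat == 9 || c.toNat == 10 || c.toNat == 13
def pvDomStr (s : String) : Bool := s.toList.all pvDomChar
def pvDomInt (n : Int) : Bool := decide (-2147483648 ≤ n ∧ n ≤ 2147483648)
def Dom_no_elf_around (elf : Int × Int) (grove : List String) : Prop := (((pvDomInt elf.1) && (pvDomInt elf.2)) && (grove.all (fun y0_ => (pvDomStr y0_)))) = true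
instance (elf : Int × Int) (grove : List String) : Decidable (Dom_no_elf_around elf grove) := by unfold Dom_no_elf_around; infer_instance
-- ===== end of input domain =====

-- B slices the 3×3 window out of the rows, joins it to one string and does a single
-- substring test, instead of A's per-cell probing with an early return; objective: alternative.

-- grove[r][c] as an Option (none exactly where Python raises IndexError); used by port A
def pvCell (grove : List String) (r c : Int) : Option Char :=
  match PySem.List.pyGet? grove r with
  | none => none
  | some s => PySem.Str.pyGet? s c

-- ===== PORT A =====
-- the `for direction in directions` loop with its early `return False`
def pvALoop (row col rows cols : Int) (grove : List String) : List (Int × Int) → Bool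
  | [] => true
  | (ro, co) :: rest =>
      if row + ro ≥ 0 ∧ row + ro < rows ∧ col + co ≥ 0 ∧ col + co < cols ∧
          pvCell grove (row + ro) (col + co) = some '#' then
        false
      else
        pvALoop row col rows cols grove rest

def no_elf_around (elf : Int × Int) (grove : List String) : Bool :=
  match grove with
  | [] => true   -- Python raises IndexError on len(grove[0]); excluded by Pre_
  | h :: _ =>
    let rows : Int := grove.length
    let cols : Int := (h.toList.length : Int)
    pvALoop elf.1 elf.2 rows cols grove
      [(-1, 0), (-1, 1), (0, 1), (1, 1), (1, 0), (1, -1), (0, -1), (-1, -1)]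

-- ===== PORT B =====
def no_elf_around_alt (elf : Int × Int) (grove : List String) : Bool :=
  match grove with
  | [] => true   -- Python raises IndexError on len(grove[0]); excluded by Pre_
  | h :: _ =>
    let rows : Int := grove.length
    let cols : Int := (h.toList.length : Int)
    let row := elf.1
    let col := elf.2
    let cl := max 0 (col - 1)
    let cu := min cols (col + 2)
    let parts :=
      (PySem.List.pyRange (max 0 (row - 1)) (min rows (row + 2)) 1).foldl
        (fun acc r =>
          -- grove[r]: r drawn from range(0-clamped, rows-clamped) is always in bounds, so getD "" is exact
          let line := ((PySem.List.pyGet? grove r).getD "").toList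
          if r = row ∧ 0 ≤ col ∧ col < cols then
            acc ++ [PySem.List.slice line (some cl) (some col) ++
                    PySem.List.slice line (some (col + 1)) (some cu)]
          else if cl < cu then
            acc ++ [PySem.List.slice line (some cl) (some cu)]
          else acc) []
    !(PySem.Chars.isIn ['#'] (PySem.Chars.join [] parts))

-- ===== PRECONDITION & SPEC =====
-- Pre_ excludes the empty grove (A raises IndexError on len(grove[0])) and ragged groves in which
-- some in-window neighbor cell is missing from its (shorter-than-row-0) row: on that region Python A
-- raises IndexError unless its fixed scan order meets a '#' first, so A's value there is an accident
-- of the direction order (B's slices simply skip the missing cells).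
def Pre_no_elf_around (elf : Int × Int) (grove : List String) : Prop :=
  grove ≠ [] ∧
  ∀ r ∈ PySem.List.pyRange (max 0 (elf.1 - 1)) (min (grove.length : Int) (elf.1 + 2)) 1,
    ∀ c ∈ PySem.List.pyRange (max 0 (elf.2 - 1)) (min ((grove.headI.toList.length : Nat) : Int) (elf.2 + 2)) 1,
      ¬(r = elf.1 ∧ c = elf.2) →
        c < (((PySem.List.pyGet? grove r).getD "").toList.length : Int)
instance (elf : Int × Int) (grove : List String) : Decidable (Pre_no_elf_around elf grove) := by unfold Pre_no_elf_around; infer_instance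

def pvWitness_no_elf_around : (Int × Int) × List String := ((1, 1), ["...", ".#.", "..."])

def Spec_no_elf_around (elf : Int × Int) (grove : List String) (out : Bool) : Prop := out = no_elf_around_alt elf grove
instance (elf : Int × Int) (grove : List String) (out : Bool) : Decidable (Spec_no_elf_around elf grove out) := by unfold Spec_no_elf_around; infer_instance

-- ===== CLAIM (what is proved, stated in full; the proofs are below) =====
def Claim_equal_no_elf_around : Prop := ∀ (elf : Int × Int) (grove : List String), Dom_no_elf_around elf grove → Pre_no_elf_around elf grove → Spec_no_elf_around elf grove (no_elf_around elf grove)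

-- ===== LEMMAS AND PROOFS =====

-- the common characterization: no in-bounds non-center cell of the 3×3 window holds '#'
def pvQuiet (row col rows cols : Int) (grove : List String) : Prop :=
  ∀ r c : Int, row - 1 ≤ r → r ≤ row + 1 → 0 ≤ r → r < rows →
    col - 1 ≤ c → c ≤ col + 1 → 0 ≤ c → c < cols →
    ¬(r = row ∧ c = col) → pvCell grove r c ≠ some '#'

lemma pvA_true_iff (row col rows cols : Int) (grove : List String) :
    pvALoop row col rows cols grove
        [(-1, 0), (-1, 1), (0, 1), (1, 1), (1, 0), (1, -1), (0, -1), (-1, -1)] = true ↔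
      pvQuiet row col rows cols grove := by
  simp only [pvALoop]
  constructor
  · intro h r c h1 h2 h3 h4 h5 h6 h7 h8 hc hcell
    split_ifs at h with g1 g2 g3 g4 g5 g6 g7 g8
    · -- all eight guards failed; case on which cell (r,c) is
      have hr : r = row - 1 ∨ r = row ∨ r = row + 1 := by omega
      have hcc : c = col - 1 ∨ c = col ∨ c = col + 1 := by omega
      rcases hr with hr | hr | hr <;> rcases hcc with hcc | hcc | hcc
      · exact g8 ⟨by omega, by omega, by omega, by omega, by rw [show row + -1 = r from by omega, show col + -1 = c from by omega]; exact hcell⟩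
      · exact g1 ⟨by omega, by omega, by omega, by omega, by rw [show row + -1 = r from by omega, show col + 0 = c from by omega]; exact hcell⟩
      · exact g2 ⟨by omega, by omega, by omega, by omega, by rw [show row + -1 = r from by omega, show col + 1 = c from by omega]; exact hcell⟩
      · exact g7 ⟨by omega, by omega, by omega, by omega, by rw [show row + 0 = r from by omega, show col + -1 = c from by omega]; exact hcell⟩
      · exact hc ⟨by omega, by omega⟩
      · exact g3 ⟨by omega, by omega, by omega, by omega, by rw [show row + 0 = r from by omega, show col + 1 = c from by omega]; exact hcell⟩
      · exact g6 ⟨by omega, by omega, by omega, by omega, by rw [show row + 1 = r from by omega, show col + -1 = c from by omega]; exact hcell⟩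
      · exact g5 ⟨by omega, by omega, by omega, by omega, by rw [show row + 1 = r from by omega, show col + 0 = c from by omega]; exact hcell⟩
      · exact g4 ⟨by omega, by omega, by omega, by omega, by rw [show row + 1 = r from by omega, show col + 1 = c from by omega]; exact hcell⟩
  · intro h
    have k : ∀ ro co : Int, ¬(ro = 0 ∧ co = 0) → -1 ≤ ro → ro ≤ 1 → -1 ≤ co → co ≤ 1 →
        ¬(row + ro ≥ 0 ∧ row + ro < rows ∧ col + co ≥ 0 ∧ col + co < cols ∧
          pvCell grove (row + ro) (col + co) = some '#') := by
      rintro ro co hnc b1 b2 b3 b4 ⟨p1, p2, p3, p4, p5⟩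
      exact h (row + ro) (col + co) (by omega) (by omega) (by omega) (by omega)
        (by omega) (by omega) (by omega) (by omega) (by rintro ⟨e1, e2⟩; exact hnc ⟨by omega, by omega⟩) p5
    rw [if_neg (k (-1) 0 (by decide) (by decide) (by decide) (by decide) (by decide)),
        if_neg (k (-1) 1 (by decide) (by decide) (by decide) (by decide) (by decide)),
        if_neg (k 0 1 (by decide) (by decide) (by decide) (by decide) (by decide)),
        if_neg (k 1 1 (by decide) (by decide) (by decide) (by decide) (by decide)),
        if_neg (k 1 0 (by decide) (by decide) (by decide) (by decide) (by decide)),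
        if_neg (k 1 (-1) (by decide) (by decide) (by decide) (by decide) (by decide)),
        if_neg (k 0 (-1) (by decide) (by decide) (by decide) (by decide) (by decide)),
        if_neg (k (-1) (-1) (by decide) (by decide) (by decide) (by decide) (by decide))]


-- pvRowChars row col cl cu cols grove r = the characters B's loop body contributes for window row r
def pvRowChars (row col cl cu cols : Int) (grove : List String) (r : Int) : List Char :=
  let line := ((PySem.List.pyGet? grove r).getD "").toList
  if r = row ∧ 0 ≤ col ∧ col < cols then
    PySem.List.slice line (some cl) (some col) ++ PySem.List.slice line (some (col + 1)) (some cu)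
  else if cl < cu then PySem.List.slice line (some cl) (some cu)
  else []

lemma pvJoinNil (ps : List (List Char)) : PySem.Chars.join [] ps = ps.flatten := by
  induction ps with
  | nil => rfl
  | cons a t ih =>
    cases t with
    | nil => simp [PySem.Chars.join, List.intercalate]
    | cons b u =>
      simp only [PySem.Chars.join] at *
      rw [show List.intercalate [] (a::b::u) = a ++ [].flatten ++ List.intercalate [] (b::u) from by
        simp [List.intercalate, show List.intersperse ([]:List Char) (a::b::u) = a :: [] :: List.intersperse [] (b::u) from rfl]]
      simp [ih]

lemma pvIsInSingleton (cs : List Char) : PySem.Chars.isIn ['#'] cs = true ↔ '#' ∈ cs := by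
  rw [PySem.Chars.isIn_iff_infix]
  constructor
  · intro h; exact h.sublist.subset (by simp)
  · intro h; obtain ⟨s, t, rfl⟩ := List.append_of_mem h
    exact ⟨s, t, by simp⟩

lemma pvMemSlice (line : List Char) (a b : Int) (ha : 0 ≤ a) (hb : 0 ≤ b) :
    '#' ∈ PySem.List.slice line (some a) (some b) ↔
      ∃ c : Int, a ≤ c ∧ c < b ∧ getElem? line c.toNat = some '#' := by
  rw [PySem.List.slice_toNat line ha hb]
  constructor
  · intro h
    obtain ⟨i, hi, hgi⟩ := List.mem_iff_getElem.1 h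
    have hlen : i < min (b.toNat - a.toNat) (line.length - a.toNat) := by
      simpa [List.length_take, List.length_drop] using hi
    refine ⟨a + i, by omega, by omega, ?_⟩
    have hn : (a + (i:Int)).toNat = a.toNat + i := by omega
    rw [hn, List.getElem?_eq_getElem (by omega)]
    rw [List.getElem_take, List.getElem_drop] at hgi
    exact congrArg some hgi
  · rintro ⟨c, h1, h2, h3⟩
    obtain ⟨hlt, hg⟩ := List.getElem?_eq_some_iff.1 h3
    apply List.mem_iff_getElem.2
    refine ⟨c.toNat - a.toNat, by simp [List.length_take, List.length_drop]; omega, ?_⟩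
    have he : a.toNat + (c.toNat - a.toNat) = c.toNat := by omega
    simp only [List.getElem_take, List.getElem_drop, he]
    exact hg

lemma pvCell_char (grove : List String) (r c : Int) (hc : 0 ≤ c) (hr : 0 ≤ r) (hr2 : r < (grove.length : Int)) :
    pvCell grove r c = getElem? (((PySem.List.pyGet? grove r).getD "").toList) c.toNat := by
  have hrn : r.toNat < grove.length := by omega
  have h1 : PySem.List.pyGet? grove r = some (grove[r.toNat]) := by
    have h2 : PySem.List.pyGet? grove ((r.toNat : Nat) : Int) = getElem? grove r.toNat :=
      PySem.List.pyGet?_natCast grove r.toNat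
    rw [show ((r.toNat : Nat) : Int) = r by omega] at h2
    rw [h2]
    exact List.getElem?_eq_getElem hrn
  rw [pvCell, h1]
  simp only [Option.getD_some]
  have h3 : PySem.Str.pyGet? grove[r.toNat] ((c.toNat : Nat) : Int) = getElem? (grove[r.toNat]).toList c.toNat :=
    PySem.Str.pyGet?_natCast _ _
  rw [show ((c.toNat : Nat) : Int) = c by omega] at h3
  exact h3

-- the loop body of B's port appends exactly pvRowChars (or nothing when it is empty)
lemma pvFold_flatten (row col cl cu cols : Int) (grove : List String)
    (l : List Int) (acc : List (List Char)) :
    (l.foldl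
        (fun acc r =>
          let line := ((PySem.List.pyGet? grove r).getD "").toList
          if r = row ∧ 0 ≤ col ∧ col < cols then
            acc ++ [PySem.List.slice line (some cl) (some col) ++
                    PySem.List.slice line (some (col + 1)) (some cu)]
          else if cl < cu then
            acc ++ [PySem.List.slice line (some cl) (some cu)]
          else acc) acc).flatten
      = acc.flatten ++ l.flatMap (pvRowChars row col cl cu cols grove) := by
  induction l generalizing acc with
  | nil => simp
  | cons r rest ih =>
    simp only [List.foldl_cons, List.flatMap_cons]
    rw [ih]
    unfold pvRowChars
    split_ifs with g1 g2 <;> simp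

lemma pvRow_mem (row col cols : Int) (grove : List String) (r : Int)
    (hr0 : 0 ≤ r) (hrlen : r < (grove.length : Int)) :
    '#' ∈ pvRowChars row col (max 0 (col - 1)) (min cols (col + 2)) cols grove r ↔
      ∃ c : Int, col - 1 ≤ c ∧ c ≤ col + 1 ∧ 0 ≤ c ∧ c < cols ∧ ¬(r = row ∧ c = col) ∧
        pvCell grove r c = some '#' := by
  unfold pvRowChars
  split_ifs with g1 g2
  · -- r = row and the center column is a real column
    obtain ⟨hrw, hc0, hccols⟩ := g1
    rw [List.mem_append, pvMemSlice _ _ _ (by omega) (by omega),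
        pvMemSlice _ _ _ (by omega) (by omega)]
    constructor
    · rintro (⟨c, k1, k2, k3⟩ | ⟨c, k1, k2, k3⟩)
      · exact ⟨c, by omega, by omega, by omega, by omega,
          by rintro ⟨e1, e2⟩; omega,
          by rw [pvCell_char grove r c (by omega) hr0 hrlen]; exact k3⟩
      · exact ⟨c, by omega, by omega, by omega, by omega,
          by rintro ⟨e1, e2⟩; omega,
          by rw [pvCell_char grove r c (by omega) hr0 hrlen]; exact k3⟩
    · rintro ⟨c, k1, k2, k3, k4, k5, k6⟩
      rw [pvCell_char grove r c (by omega) hr0 hrlen] at k6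
      have hcne : c ≠ col := fun e => k5 ⟨hrw, e⟩
      by_cases hlt : c < col
      · exact Or.inl ⟨c, by omega, by omega, k6⟩
      · exact Or.inr ⟨c, by omega, by omega, k6⟩
  · -- window has at least one real column; r ≠ row or the center column is out of range
    rw [pvMemSlice _ _ _ (by omega) (by omega)]
    constructor
    · rintro ⟨c, k1, k2, k3⟩
      refine ⟨c, by omega, by omega, by omega, by omega, ?_,
        by rw [pvCell_char grove r c (by omega) hr0 hrlen]; exact k3⟩
      rintro ⟨e1, e2⟩
      exact g1 ⟨e1, by omega, by omega⟩
    · rintro ⟨c, k1, k2, k3, k4, k5, k6⟩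
      rw [pvCell_char grove r c (by omega) hr0 hrlen] at k6
      exact ⟨c, by omega, by omega, k6⟩
  · -- empty column window: no cell satisfies the bounds
    simp only [List.not_mem_nil, false_iff]
    rintro ⟨c, k1, k2, k3, k4, k5, k6⟩
    exact g2 (by omega)

lemma pvB_true_iff (row col : Int) (h : String) (t : List String) :
    no_elf_around_alt (row, col) (h :: t) = true ↔
      pvQuiet row col ((h :: t).length : Int) ((h.toList.length : Nat) : Int) (h :: t) := by
  unfold no_elf_around_alt
  simp only [Bool.not_eq_eq_eq_not, Bool.not_true]
  rw [← Bool.not_eq_true (PySem.Chars.isIn _ _), not_iff_comm, Iff.comm, pvIsInSingleton,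
    pvJoinNil, pvFold_flatten]
  simp only [List.flatten_nil, List.nil_append, List.mem_flatMap, PySem.List.mem_pyRange_one]
  constructor
  · rintro ⟨r, ⟨hr1, hr2⟩, hmem⟩
    obtain ⟨c, k1, k2, k3, k4, k5, k6⟩ :=
      (pvRow_mem row col _ (h :: t) r (by omega) (by omega)).1 hmem
    intro hq
    exact hq r c (by omega) (by omega) (by omega) (by omega) k1 k2 k3 k4 k5 k6
  · intro hbad
    unfold pvQuiet at hbad
    push Not at hbad
    obtain ⟨r, c, h1, h2, h3, h4, h5, h6, h7, h8, h9, h10⟩ := hbad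
    refine ⟨r, ⟨by omega, by omega⟩, ?_⟩
    exact (pvRow_mem row col _ (h :: t) r (by omega) (by omega)).2
      ⟨c, h5, h6, h7, h8, by rintro ⟨e1, e2⟩; exact h9 e1 e2, h10⟩

theorem no_elf_around_spec : Claim_equal_no_elf_around := by
  rintro ⟨row, col⟩ grove _hdom hpre
  unfold Spec_no_elf_around
  match grove with
  | [] => exact absurd rfl hpre.1
  | h :: t =>
    rw [Bool.eq_iff_iff, pvB_true_iff]
    unfold no_elf_around
    simp only []
    exact pvA_true_iff row col _ _ (h :: t)
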